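-- pv_equiv track=rewrite | github.com/Immortals-33/Scaffold-Lab | analysis/utils.py | get_non_redesign_positions
-- ===== SOURCE A (Python) =====
-- from typing import Optional, Union, List, Tuple, Dict
--
-- def get_non_redesign_positions(contig_segments: List[Tuple[Union[str, None], int, int]], redesign_segments: List[Tuple[str, int, int]]) -> List[Tuple[str, int, int]]:
--     """
--     Determine non-redesign positions by subtracting redesign segments from contig segments.
--     """
--     non_redesign_positions = []
--
--     for segment in contig_segments:
--         if segment[0] == "scaffold":
--             continue  # Skip scaffold segments
--
--         chain, start, end = segment
--         current_pos = start
--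
--         while current_pos <= end:
--             # Check if this position is within any redesign segment
--             is_redesign = any(chain == r_chain and r_start <= current_pos <= r_end for r_chain, r_start, r_end in redesign_segments)
--             if not is_redesign:
--                 non_redesign_positions.append((chain, current_pos))
--             current_pos += 1
--
--     return non_redesign_positions
-- ===== SOURCE B (Python) =====
-- def get_non_redesign_positions(contig_segments, redesign_segments):
--     """
--     Determine non-redesign positions by subtracting redesign segments from contig segments.
--     Interval sweep: per contig segment, sort the matching redesign intervals by start and
--     emit the uncovered gaps directly instead of testing every position against every interval.
--     """
--     non_redesign_positions = []
--
--     for chain, start, end in contig_segments: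
--         if chain == "scaffold":
--             continue
--
--         intervals = sorted(((s, e) for c, s, e in redesign_segments if c == chain),
--                            key=lambda se: se[0])
--
--         cur = start
--         for s, e in intervals:
--             stop = min(s - 1, end)
--             while cur <= stop:
--                 non_redesign_positions.append((chain, cur))
--                 cur += 1
--             if e + 1 > cur:
--                 cur = e + 1
--         while cur <= end:
--             non_redesign_positions.append((chain, cur))
--             cur += 1
--
--     return non_redesign_positions
-- ===== Notes on version B (the rewrite author's own statement) =====
-- stated objective: faster
-- what changed: Replaces the per-position any-scan over all redesign segments with a per-segment sort of the matching intervals followed by a single sweep that emits the uncovered gaps directly.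
import Mathlib
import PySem

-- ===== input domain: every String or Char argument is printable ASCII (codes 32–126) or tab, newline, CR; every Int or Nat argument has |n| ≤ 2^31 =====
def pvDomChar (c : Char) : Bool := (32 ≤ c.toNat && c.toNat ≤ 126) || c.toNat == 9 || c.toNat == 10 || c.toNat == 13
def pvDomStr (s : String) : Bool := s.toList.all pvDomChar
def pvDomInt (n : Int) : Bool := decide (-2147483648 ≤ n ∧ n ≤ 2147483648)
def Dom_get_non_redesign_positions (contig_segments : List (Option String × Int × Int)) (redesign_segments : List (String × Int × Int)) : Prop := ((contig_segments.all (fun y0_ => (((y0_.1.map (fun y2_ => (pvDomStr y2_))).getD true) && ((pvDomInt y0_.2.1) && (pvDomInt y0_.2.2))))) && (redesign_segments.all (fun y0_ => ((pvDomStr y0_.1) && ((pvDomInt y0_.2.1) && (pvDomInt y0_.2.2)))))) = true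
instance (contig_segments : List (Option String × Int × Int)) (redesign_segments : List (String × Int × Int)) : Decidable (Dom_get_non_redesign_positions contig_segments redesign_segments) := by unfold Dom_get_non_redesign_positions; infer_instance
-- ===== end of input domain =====

-- B replaces A's per-position scan over all redesign segments by a per-segment sort of the
-- matching intervals plus a single gap-emitting sweep (objective: faster).

-- ===== PORT A =====
-- `any(chain == r_chain and r_start <= current_pos <= r_end for ...)`
def pvCovA (chain : Option String) (pos : Int) (rs : List (String × Int × Int)) : Bool :=
  rs.any (fun r => chain == some r.1 && decide (r.2.1 ≤ pos) && decide (pos ≤ r.2.2))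

-- the `while current_pos <= end` loop of A, appending uncovered positions
def pvWhileA (chain : Option String) (rs : List (String × Int × Int)) (cur fin : Int) :
    List (Option String × Int) :=
  if h : cur ≤ fin then
    (if pvCovA chain cur rs then [] else [(chain, cur)]) ++ pvWhileA chain rs (cur + 1) fin
  else []
termination_by (fin + 1 - cur).toNat
decreasing_by omega

def get_non_redesign_positions (contig_segments : List (Option String × Int × Int))
    (redesign_segments : List (String × Int × Int)) : List (Option String × Int) :=
  contig_segments.foldl (fun acc seg =>
    if seg.1 == some "scaffold" then acc
    else acc ++ pvWhileA seg.1 redesign_segments seg.2.1 seg.2.2) []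

-- ===== PORT B =====
-- the `while cur <= stop: append; cur += 1` emission loop of B
def pvEmitB (chain : Option String) (cur stop : Int) : List (Option String × Int) :=
  if h : cur ≤ stop then (chain, cur) :: pvEmitB chain (cur + 1) stop else []
termination_by (stop + 1 - cur).toNat
decreasing_by omega

-- the `for s, e in intervals` sweep of B; cur after the inner while is max cur (stop+1)
def pvSweepB (chain : Option String) (fin : Int) (cur : Int) :
    List (Int × Int) → List (Option String × Int)
  | [] => pvEmitB chain cur fin
  | (s, e) :: rest =>
      pvEmitB chain cur (min (s - 1) fin) ++
        pvSweepB chain fin (max (max cur (min (s - 1) fin + 1)) (e + 1)) rest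

def get_non_redesign_positions_alt (contig_segments : List (Option String × Int × Int))
    (redesign_segments : List (String × Int × Int)) : List (Option String × Int) :=
  contig_segments.foldl (fun acc seg =>
    if seg.1 == some "scaffold" then acc
    else
      acc ++ pvSweepB seg.1 seg.2.2 seg.2.1
        (PySem.List.sorted
          (redesign_segments.filterMap (fun r => if some r.1 == seg.1 then some r.2 else none))
          (fun se => se.1) false)) []

-- ===== PRECONDITION & SPEC =====
def Spec_get_non_redesign_positions (contig_segments : List (Option String × Int × Int)) (redesign_segments : List (String × Int × Int)) (out : List (Option String × Int)) : Prop := out = get_non_redesign_positions_alt contig_segments redesign_segments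
instance (contig_segments : List (Option String × Int × Int)) (redesign_segments : List (String × Int × Int)) (out : List (Option String × Int)) : Decidable (Spec_get_non_redesign_positions contig_segments redesign_segments out) := by unfold Spec_get_non_redesign_positions; infer_instance

-- ===== CLAIM (what is proved, stated in full; the proofs are below) =====
def Claim_equal_get_non_redesign_positions : Prop := ∀ (contig_segments : List (Option String × Int × Int)) (redesign_segments : List (String × Int × Int)), Dom_get_non_redesign_positions contig_segments redesign_segments → Spec_get_non_redesign_positions contig_segments redesign_segments (get_non_redesign_positions contig_segments redesign_segments)

-- ===== LEMMAS AND PROOFS =====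

-- the integer range [cur, fin] as a list (proof-only helper)
def pvRng (cur fin : Int) : List Int :=
  if h : cur ≤ fin then cur :: pvRng (cur + 1) fin else []
termination_by (fin + 1 - cur).toNat
decreasing_by omega

-- coverage test over bare intervals
def pvCov (pos : Int) (ivs : List (Int × Int)) : Bool :=
  ivs.any (fun se => decide (se.1 ≤ pos) && decide (pos ≤ se.2))

theorem pvRng_nil (cur fin : Int) (h : fin < cur) : pvRng cur fin = [] := by
  unfold pvRng; simp; omega

theorem mem_pvRng (cur fin p : Int) (hp : p ∈ pvRng cur fin) : cur ≤ p ∧ p ≤ fin := by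
  induction cur using pvRng.induct (fin := fin) with
  | case1 cur h ih =>
      rw [pvRng, dif_pos h] at hp
      rcases List.mem_cons.mp hp with rfl | hmem
      · omega
      · have := ih hmem; omega
  | case2 cur h =>
      rw [pvRng, dif_neg h] at hp; simp at hp

theorem pvRng_split (b a c : Int) (hbc : b ≤ c) :
    pvRng a c = pvRng a b ++ pvRng (max a (b + 1)) c := by
  induction a using pvRng.induct (fin := c) with
  | case1 a h ih =>
      by_cases hab : a ≤ b
      · have h1 : max a (b + 1) = b + 1 := by omega
        have h2 : max (a + 1) (b + 1) = b + 1 := by omega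
        have e1 : pvRng a b = a :: pvRng (a + 1) b := by rw [pvRng, dif_pos hab]
        rw [pvRng, dif_pos h, e1, ih, h1, h2]
        simp
      · have h1 : max a (b + 1) = a := by omega
        have e1 : pvRng a b = [] := pvRng_nil a b (by omega)
        rw [e1, h1]
        simp
  | case2 a h =>
      have h1 : pvRng a b = [] := pvRng_nil _ _ (by omega)
      have h2 : pvRng (max a (b + 1)) c = [] := pvRng_nil _ _ (by omega)
      rw [pvRng, dif_neg h, h1, h2]; simp

theorem pvEmitB_eq (chain : Option String) (cur stop : Int) :
    pvEmitB chain cur stop = (pvRng cur stop).map (fun p => (chain, p)) := by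
  induction cur using pvRng.induct (fin := stop) with
  | case1 cur h ih => rw [pvEmitB, dif_pos h, pvRng, dif_pos h, ih]; simp
  | case2 cur h => rw [pvEmitB, dif_neg h, pvRng, dif_neg h]; simp

-- A's while loop is the filtered range
theorem pvWhileA_eq (chain : Option String) (rs : List (String × Int × Int)) (cur fin : Int) :
    pvWhileA chain rs cur fin =
      ((pvRng cur fin).filter (fun p => !pvCovA chain p rs)).map (fun p => (chain, p)) := by
  induction cur using pvRng.induct (fin := fin) with
  | case1 cur h ih =>
      rw [pvWhileA, dif_pos h, pvRng, dif_pos h, ih]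
      by_cases hc : pvCovA chain cur rs <;> simp [hc]
  | case2 cur h =>
      rw [pvWhileA, dif_neg h, pvRng, dif_neg h]; simp

-- A's coverage test equals the bare test over the chain's intervals
theorem pvCovA_eq (chain : Option String) (p : Int) (rs : List (String × Int × Int)) :
    pvCovA chain p rs =
      pvCov p (rs.filterMap (fun r => if some r.1 == chain then some r.2 else none)) := by
  rw [Bool.eq_iff_iff]
  unfold pvCovA pvCov
  simp only [List.any_eq_true, List.mem_filterMap, Bool.and_eq_true, decide_eq_true_eq,
    beq_iff_eq]
  constructor
  · rintro ⟨r, hr, ⟨hch, h1⟩, h2⟩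
    exact ⟨r.2, ⟨r, hr, by rw [if_pos hch.symm]⟩, h1, h2⟩
  · rintro ⟨iv, ⟨r, hr, hf⟩, h1, h2⟩
    by_cases hc : some r.1 = chain
    · rw [if_pos hc] at hf
      cases hf
      exact ⟨r, hr, ⟨hc.symm, h1⟩, h2⟩
    · rw [if_neg hc] at hf
      cases hf

theorem pvCov_perm (p : Int) (xs ys : List (Int × Int)) (h : xs.Perm ys) :
    pvCov p xs = pvCov p ys := by
  unfold pvCov
  rw [Bool.eq_iff_iff]
  simp only [List.any_eq_true]
  constructor <;> rintro ⟨x, hx, hfx⟩ <;> exact ⟨x, by rw [h.mem_iff] at *; exact hx, hfx⟩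

-- tail of the sweep step: the part of the range past the first interval
theorem pvSweep_part2 (s e cur fin : Int) (rest : List (Int × Int))
    (hhead : ∀ x ∈ rest, s ≤ x.1) :
    (pvRng (max (max cur (min (s - 1) fin + 1)) (e + 1)) fin).filter
        (fun p => !pvCov p rest)
      = (pvRng (max cur (min (s - 1) fin + 1)) fin).filter
          (fun p => !pvCov p ((s, e) :: rest)) := by
  by_cases hsf : s ≤ fin
  · have hmin : min (s - 1) fin = s - 1 := by omega
    rw [hmin]
    set m : Int := max cur (s - 1 + 1) with hm
    have hms : s ≤ m := by omega
    by_cases hef : e ≤ fin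
    · rw [pvRng_split e m fin hef, List.filter_append]
      have h1 : (pvRng m e).filter (fun p => !pvCov p ((s, e) :: rest)) = [] := by
        rw [List.filter_eq_nil_iff]
        intro p hp
        have := mem_pvRng _ _ _ hp
        simp [pvCov, List.any_cons]
        intro h1
        exfalso; omega
      rw [h1]
      simp only [List.nil_append]
      have harg : max (max cur (s - 1 + 1)) (e + 1) = max m (e + 1) := by omega
      rw [harg]
      apply List.filter_congr
      intro p hp
      have := mem_pvRng _ _ _ hp
      simp [pvCov, List.any_cons]
      intro _
      omega
    · have hl : pvRng (max (max cur (s - 1 + 1)) (e + 1)) fin = [] :=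
        pvRng_nil _ _ (by omega)
      rw [hl]
      symm
      simp only [List.filter_nil]
      rw [List.filter_eq_nil_iff]
      intro p hp
      have := mem_pvRng _ _ _ hp
      simp [pvCov, List.any_cons]
      intro h1
      exfalso; omega
  · have hmin : min (s - 1) fin = fin := by omega
    rw [hmin, pvRng_nil _ _ (by omega), pvRng_nil _ _ (by omega)]
    simp

-- THE sweep lemma: on start-sorted intervals B's sweep is the filtered range
theorem pvSweepB_eq (chain : Option String) (fin : Int) (ivs : List (Int × Int)) :
    ivs.Pairwise (fun a b => a.1 ≤ b.1) → ∀ cur : Int,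
    pvSweepB chain fin cur ivs =
      ((pvRng cur fin).filter (fun p => !pvCov p ivs)).map (fun p => (chain, p)) := by
  induction ivs with
  | nil =>
      intro _ cur
      simp only [pvSweepB, pvEmitB_eq]
      simp [pvCov]
  | cons se rest ih =>
      intro hp cur
      obtain ⟨s, e⟩ := se
      have hhead : ∀ x ∈ rest, s ≤ x.1 := by
        intro x hx; exact (List.pairwise_cons.mp hp).1 x hx
      have hrest := (List.pairwise_cons.mp hp).2
      simp only [pvSweepB]
      rw [pvEmitB_eq, ih hrest]
      have hstop : min (s - 1) fin ≤ fin := by omega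
      rw [pvRng_split (min (s - 1) fin) cur fin hstop, List.filter_append, List.map_append]
      congr 1
      · congr 1
        symm
        rw [List.filter_eq_self]
        intro p hp'
        have hpm := mem_pvRng _ _ _ hp'
        simp [pvCov, List.any_cons]
        constructor
        · omega
        · intro a b hab h1
          have := hhead (a, b) hab
          omega
      · rw [pvSweep_part2 s e cur fin rest hhead]

-- per-segment agreement of the two loop bodies
theorem pvSeg_eq (chain : Option String) (rs : List (String × Int × Int)) (start fin : Int) :
    pvWhileA chain rs start fin =
      pvSweepB chain fin start
        (PySem.List.sorted
          (rs.filterMap (fun r => if some r.1 == chain then some r.2 else none))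
          (fun se => se.1) false) := by
  set ivs0 := rs.filterMap (fun r => if some r.1 == chain then some r.2 else none) with hivs0
  set ivs := PySem.List.sorted ivs0 (fun se => se.1) false with hivs
  have hperm : ivs.Perm ivs0 := PySem.List.sorted_perm _ _ _
  have hpair : ivs.Pairwise (fun a b => a.1 ≤ b.1) := PySem.List.sorted_pairwise _ _
  rw [pvWhileA_eq, pvSweepB_eq chain fin ivs hpair start]
  congr 1
  apply List.filter_congr
  intro p _
  rw [pvCovA_eq, ← pvCov_perm p ivs ivs0 hperm]

-- ===== VERDICT (by name: the statement is the Claim_ definition above) =====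
theorem get_non_redesign_positions_spec : Claim_equal_get_non_redesign_positions := by
  intro cs rs _
  unfold Spec_get_non_redesign_positions get_non_redesign_positions get_non_redesign_positions_alt
  congr 1
  funext acc seg
  by_cases hsc : seg.1 == some "scaffold"
  · simp [hsc]
  · simp only [hsc, Bool.false_eq_true, if_false]
    rw [pvSeg_eq]
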